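-- pv_equiv track=rewrite | github.com/JackYFL/EmoLA | emollava/eval/eval_FABA_llava.py | AUint2Labels
-- ===== SOURCE A (Python) =====
-- def AUint2Labels(AU_int_string, AU2indices):
--     AUs = AU_int_string.split(', ')
--     AU_labels = [0] * len(AU2indices)
--     for AU in AUs:
--         try:
--             idx = AU2indices[AU]
--             AU_labels[idx] = 1
--         except:
--             continue
--     return AU_labels
--     pass
-- ===== SOURCE B (Python) =====
-- def AUint2Labels(AU_int_string, AU2indices):
--     tokens = set(AU_int_string.split(', '))
--     n = len(AU2indices)
--     valid = {idx for AU, idx in AU2indices.items() if AU in tokens and 0 <= idx < n}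
--     return [1 if i in valid else 0 for i in range(n)]
-- ===== Notes on version B (the rewrite author's own statement) =====
-- stated objective: alternative
-- what changed: B inverts the traversal: it builds a set of the split tokens once, scans the dict's items (not the tokens) filtering by token-set membership and a bounds check to collect the valid target positions, and emits the vector by a position scan, instead of A's per-token dict lookup with try/except-guarded in-place mutation.
-- intended difference: On inputs where some token's dict binding is a negative index v with -n <= v < 0 and no other token's in-range binding targets the wrapped position n+v, A silently sets position n+v via Python's negative list indexing (an artefact of the bare except), while B leaves that position 0; skipping out-of-range indices is the intended behaviour for a label vector. — e.g. on AUint2Labels("AU1", [("AU1", -1)]): A returns [1], B returns [0]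
import Mathlib
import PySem

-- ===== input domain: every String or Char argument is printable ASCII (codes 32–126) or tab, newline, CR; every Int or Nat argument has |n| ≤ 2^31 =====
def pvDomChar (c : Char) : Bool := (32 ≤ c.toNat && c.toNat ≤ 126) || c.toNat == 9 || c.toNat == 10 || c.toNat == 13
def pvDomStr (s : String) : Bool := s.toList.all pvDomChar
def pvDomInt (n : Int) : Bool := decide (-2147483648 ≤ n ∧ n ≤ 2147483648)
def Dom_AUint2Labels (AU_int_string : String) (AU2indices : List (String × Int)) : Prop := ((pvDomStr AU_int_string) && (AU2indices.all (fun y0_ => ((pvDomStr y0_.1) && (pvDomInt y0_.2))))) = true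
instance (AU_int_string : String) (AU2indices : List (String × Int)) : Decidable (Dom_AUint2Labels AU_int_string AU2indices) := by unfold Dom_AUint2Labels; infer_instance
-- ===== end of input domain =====

-- B inverts the traversal: it scans the dict's items against a pre-built token set and emits the
-- vector by position scan; it drops out-of-range indices instead of reproducing A's bare-except
-- negative-index wraparound (see D_ below).

-- Python dict lookup (first match in the association list), used by port A.
def pvLookup (d : List (String × Int)) (k : String) : Option Int :=
  (d.find? (fun p => p.1 == k)).map Prod.snd

-- ===== PORT A =====
def AUint2Labels (AU_int_string : String) (AU2indices : List (String × Int)) : List Int :=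
  let AUs := (PySem.Str.split? AU_int_string ", ").getD []
  -- try: AU_labels[idx] = 1; except: continue — pySetD is exactly "assign, or keep the list on IndexError";
  -- a missing key (KeyError) likewise skips.
  AUs.foldl
    (fun labels AU =>
      match pvLookup AU2indices AU with
      | some idx => PySem.List.pySetD labels idx 1
      | none => labels)
    (List.replicate AU2indices.length (0 : Int))

-- ===== PORT B =====
-- 'valid = {idx for AU, idx in AU2indices.items() if AU in tokens and 0 <= idx < n}'
def pvValid (d : List (String × Int)) (tokens : PySem.Set String) : PySem.Set Int :=
  d.foldl
    (fun st p =>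
      if p.1 ∈ tokens ∧ 0 ≤ p.2 ∧ p.2 < (d.length : Int) then PySem.Set.add st p.2 else st)
    PySem.Set.empty

def AUint2Labels_alt (AU_int_string : String) (AU2indices : List (String × Int)) : List Int :=
  let tokens := PySem.Set.ofList ((PySem.Str.split? AU_int_string ", ").getD [])
  let valid := pvValid AU2indices tokens
  (List.range AU2indices.length).map (fun i : Nat => if ((i : Int) ∈ valid) then 1 else 0)

-- ===== PRECONDITION & SPEC =====
-- Pre_ excludes association lists with duplicate keys: a Python dict cannot contain them, so such
-- lists do not represent any actual input; on them the model's first-match lookup vs item iteration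
-- would differ only by accident of the encoding.
def Pre_AUint2Labels (AU_int_string : String) (AU2indices : List (String × Int)) : Prop :=
  (AU2indices.map Prod.fst).Nodup
instance (AU_int_string : String) (AU2indices : List (String × Int)) : Decidable (Pre_AUint2Labels AU_int_string AU2indices) := by unfold Pre_AUint2Labels; infer_instance

def pvWitness_AUint2Labels : String × (List (String × Int)) :=
  ("AU1, AU4", [("AU1", 0), ("AU4", 2), ("AU9", 1)])

-- On inputs where some token's dict binding is a negative index v with -n ≤ v < 0 whose wrapped
-- position n+v is not also targeted by another token's in-range binding, A silently sets position
-- n+v via Python's negative list indexing (an artefact of the bare except), while B leaves that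
-- position 0; skipping out-of-range indices is the intended behaviour for a label vector.
def D_AUint2Labels (AU_int_string : String) (AU2indices : List (String × Int)) : Prop :=
  ∃ kv ∈ AU2indices,
    kv.1 ∈ (PySem.Str.split? AU_int_string ", ").getD [] ∧
    AU2indices.find? (fun q => q.1 == kv.1) = some kv ∧
    -(AU2indices.length : Int) ≤ kv.2 ∧ kv.2 < 0 ∧
    ¬ ∃ kw ∈ AU2indices,
        kw.1 ∈ (PySem.Str.split? AU_int_string ", ").getD [] ∧
        AU2indices.find? (fun q => q.1 == kw.1) = some kw ∧
        kw.2 = kv.2 + (AU2indices.length : Int)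
instance (AU_int_string : String) (AU2indices : List (String × Int)) : Decidable (D_AUint2Labels AU_int_string AU2indices) := by unfold D_AUint2Labels; infer_instance

def Spec_AUint2Labels (AU_int_string : String) (AU2indices : List (String × Int)) (out : List Int) : Prop := ¬ D_AUint2Labels AU_int_string AU2indices → out = AUint2Labels_alt AU_int_string AU2indices
instance (AU_int_string : String) (AU2indices : List (String × Int)) (out : List Int) : Decidable (Spec_AUint2Labels AU_int_string AU2indices out) := by unfold Spec_AUint2Labels; infer_instance

def pvDiffWitness_AUint2Labels : String × (List (String × Int)) := ("AU1", [("AU1", -1)])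
def pvDiffWitnessOut_AUint2Labels : (List Int) × (List Int) := ([1], [0])

-- ===== CLAIM (what is proved, stated in full; the proofs are below) =====
def Claim_unchanged_AUint2Labels : Prop := ∀ (AU_int_string : String) (AU2indices : List (String × Int)), Dom_AUint2Labels AU_int_string AU2indices → Pre_AUint2Labels AU_int_string AU2indices → Spec_AUint2Labels AU_int_string AU2indices (AUint2Labels AU_int_string AU2indices)
def Claim_changed_AUint2Labels : Prop := Dom_AUint2Labels (pvDiffWitness_AUint2Labels.1) (pvDiffWitness_AUint2Labels.2) ∧ Pre_AUint2Labels (pvDiffWitness_AUint2Labels.1) (pvDiffWitness_AUint2Labels.2) ∧ D_AUint2Labels (pvDiffWitness_AUint2Labels.1) (pvDiffWitness_AUint2Labels.2) ∧ AUint2Labels (pvDiffWitness_AUint2Labels.1) (pvDiffWitness_AUint2Labels.2) = pvDiffWitnessOut_AUint2Labels.1 ∧ AUint2Labels_alt (pvDiffWitness_AUint2Labels.1) (pvDiffWitness_AUint2Labels.2) = pvDiffWitnessOut_AUint2Labels.2 ∧ pvDiffWitnessOut_AUint2Labels.1 ≠ pvDiffWitnessOut_AUint2Labels.2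
def Claim_exact_AUint2Labels : Prop := ∀ (AU_int_string : String) (AU2indices : List (String × Int)), Dom_AUint2Labels AU_int_string AU2indices → Pre_AUint2Labels AU_int_string AU2indices → D_AUint2Labels AU_int_string AU2indices → AUint2Labels AU_int_string AU2indices ≠ AUint2Labels_alt AU_int_string AU2indices

-- ===== LEMMAS AND PROOFS =====

-- A's loop body, named for the proofs.
def pvStepA (d : List (String × Int)) (labels : List Int) (AU : String) : List Int :=
  match pvLookup d AU with
  | some idx => PySem.List.pySetD labels idx 1
  | none => labels

theorem pvStepA_none (d : List (String × Int)) (L : List Int) (t : String)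
    (h : pvLookup d t = none) : pvStepA d L t = L := by
  unfold pvStepA; rw [h]

theorem pvStepA_some (d : List (String × Int)) (L : List Int) (t : String) (v : Int)
    (h : pvLookup d t = some v) : pvStepA d L t = PySem.List.pySetD L v 1 := by
  unfold pvStepA; rw [h]

theorem pvSetD_neg (xs : List Int) (i : Int) (v : Int)
    (h1 : -(xs.length : Int) ≤ i) (h2 : i < 0) :
    PySem.List.pySetD xs i v = xs.set (i + xs.length).toNat v := by
  unfold PySem.List.pySetD PySem.List.pySet? PySem.List.pyIdx?
  rw [if_neg (by omega), if_pos (by omega)]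
  simp only [Option.map_some, Option.getD_some]
  congr 1
  omega

theorem pvFoldA_length (d : List (String × Int)) (toks : List String) (L : List Int) :
    (toks.foldl (pvStepA d) L).length = L.length := by
  induction toks generalizing L with
  | nil => rfl
  | cons t ts ih =>
    simp only [List.foldl_cons]
    rw [ih]
    unfold pvStepA
    cases pvLookup d t with
    | none => rfl
    | some v => simp [PySem.List.length_pySetD]

-- "token AU writes 1 at position i": its binding is in range and lands (possibly wrapped) on i
def pvHitB (d : List (String × Int)) (n : ℕ) (AU : String) (i : ℕ) : Bool :=
  match pvLookup d AU with
  | some v => decide (-(n : Int) ≤ v ∧ v < n ∧ ((i : Int) = v ∨ (i : Int) = v + n))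
  | none => false

theorem pvHitB_iff (d : List (String × Int)) (n : ℕ) (AU : String) (i : ℕ) :
    pvHitB d n AU i = true ↔
      ∃ v, pvLookup d AU = some v ∧ -(n : Int) ≤ v ∧ v < n ∧ ((i : Int) = v ∨ (i : Int) = v + n) := by
  unfold pvHitB
  cases h : pvLookup d AU <;> simp

-- element-wise characterisation of A's fold (negative indices wrap, out-of-range writes are skipped)
theorem pvFoldA_get (d : List (String × Int)) (toks : List String) (L : List Int)
    (i : ℕ) (hi : i < L.length) :
    (toks.foldl (pvStepA d) L).getD i 0 =
      if toks.any (fun AU => pvHitB d L.length AU i) then 1 else L.getD i 0 := by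
  induction toks generalizing L with
  | nil => simp
  | cons t ts ih =>
    simp only [List.foldl_cons, List.any_cons]
    cases hlook : pvLookup d t with
    | none =>
      have hft : pvHitB d L.length t i = false := by unfold pvHitB; rw [hlook]
      rw [pvStepA_none d L t hlook]
      simp only [hft, Bool.false_or]
      exact ih L hi
    | some v =>
      by_cases hrange : -(L.length : Int) ≤ v ∧ v < L.length
      · -- in range: the write lands at position p = v (or v + len when v < 0)
        have hpos : ∃ p : ℕ, p < L.length ∧ ((p : Int) = v ∨ (p : Int) = v + L.length) ∧
            pvStepA d L t = L.set p 1 := by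
          by_cases hv0 : 0 ≤ v
          · exact ⟨v.toNat, by omega, Or.inl (by omega),
              by rw [pvStepA_some d L t v hlook, PySem.List.pySetD_of_nonneg L 1 hv0]⟩
          · exact ⟨(v + L.length).toNat, by omega, Or.inr (by omega),
              by rw [pvStepA_some d L t v hlook, pvSetD_neg L v 1 (by omega) (by omega)]⟩
        obtain ⟨p, hpn, hpv, hstep⟩ := hpos
        rw [hstep]
        have hlen : (L.set p 1).length = L.length := by simp
        rw [ih (L.set p 1) (by rw [hlen]; exact hi), hlen]
        by_cases hip : i = p
        · subst hip
          have hft : pvHitB d L.length t i = true := by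
            rw [pvHitB_iff]
            exact ⟨v, hlook, hrange.1, hrange.2, by omega⟩
          simp only [hft, Bool.true_or, if_true]
          by_cases hrest : ts.any (fun AU => pvHitB d L.length AU i) = true
          · rw [if_pos hrest]
          · rw [if_neg hrest]
            rw [List.getD_eq_getElem _ 0 (by rw [hlen]; exact hi)]
            simp
        · have hft : pvHitB d L.length t i = false := by
            unfold pvHitB
            rw [hlook]
            simp only [decide_eq_false_iff_not]
            rintro ⟨h1, h2, h3 | h3⟩ <;>
              rcases hpv with h4 | h4 <;> omega
          have heq : (L.set p 1).getD i 0 = L.getD i 0 := by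
            rw [List.getD_eq_getElem _ 0 (by rw [hlen]; exact hi),
                List.getD_eq_getElem _ 0 hi]
            simp [Ne.symm hip]
          simp only [hft, Bool.false_or]
          rw [heq]
      · -- out of range: IndexError, the write is skipped
        have hft : pvHitB d L.length t i = false := by
          unfold pvHitB
          rw [hlook]
          simp only [decide_eq_false_iff_not]
          rintro ⟨h1, h2, _⟩
          exact hrange ⟨h1, h2⟩
        have hstep : pvStepA d L t = L := by
          rw [pvStepA_some d L t v hlook]
          unfold PySem.List.pySetD
          rw [(PySem.List.pySet?_eq_none_iff L v 1).mpr
            (by unfold PySem.Raise.InRange; omega)]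
          rfl
        rw [hstep]
        simp only [hft, Bool.false_or]
        exact ih L hi

-- raw membership in B's item-scan fold
theorem pvValid_fold_mem (n : Int) (tokens : PySem.Set String)
    (entries : List (String × Int)) (st : PySem.Set Int) (x : Int) :
    x ∈ entries.foldl
        (fun st p => if p.1 ∈ tokens ∧ 0 ≤ p.2 ∧ p.2 < n then PySem.Set.add st p.2 else st) st ↔
      x ∈ st ∨ ∃ p ∈ entries, p.1 ∈ tokens ∧ p.2 = x ∧ 0 ≤ x ∧ x < n := by
  induction entries generalizing st with
  | nil => simp
  | cons q qs ih =>
    simp only [List.foldl_cons]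
    by_cases hq : q.1 ∈ tokens ∧ 0 ≤ q.2 ∧ q.2 < n
    · rw [if_pos hq, ih, PySem.Set.mem_add]
      constructor
      · rintro ((h | rfl) | ⟨p, hp, hv⟩)
        · exact Or.inl h
        · exact Or.inr ⟨q, by simp, hq.1, rfl, hq.2⟩
        · exact Or.inr ⟨p, List.mem_cons.mpr (Or.inr hp), hv⟩
      · rintro (h | ⟨p, hp, ht, hx, hb⟩)
        · exact Or.inl (Or.inl h)
        · rcases List.mem_cons.mp hp with rfl | hp
          · exact Or.inl (Or.inr hx.symm)
          · exact Or.inr ⟨p, hp, ht, hx, hb⟩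
    · rw [if_neg hq, ih]
      constructor
      · rintro (h | ⟨p, hp, hv⟩)
        · exact Or.inl h
        · exact Or.inr ⟨p, List.mem_cons.mpr (Or.inr hp), hv⟩
      · rintro (h | ⟨p, hp, ht, hx, hb⟩)
        · exact Or.inl h
        · rcases List.mem_cons.mp hp with rfl | hp
          · exact absurd ⟨ht, hx ▸ hb⟩ hq
          · exact Or.inr ⟨p, hp, ht, hx, hb⟩

theorem pvLookup_elim (d : List (String × Int)) (AU : String) (v : Int)
    (h : pvLookup d AU = some v) :
    ∃ p, p ∈ d ∧ p.1 = AU ∧ p.2 = v ∧ d.find? (fun q => q.1 == AU) = some p := by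
  unfold pvLookup at h
  cases hfind : d.find? (fun q => q.1 == AU) with
  | none => rw [hfind] at h; exact absurd h (by simp)
  | some p =>
    have hpAU : p.1 = AU := by have := List.find?_some hfind; simpa using this
    have hpmem : p ∈ d := List.mem_of_find?_eq_some hfind
    have hv2 : p.2 = v := by rw [hfind] at h; simpa using h
    exact ⟨p, hpmem, hpAU, hv2, rfl⟩

theorem pvLookup_of_find (d : List (String × Int)) (p : String × Int)
    (h : d.find? (fun q => q.1 == p.1) = some p) : pvLookup d p.1 = some p.2 := by
  unfold pvLookup; rw [h]; rfl

-- with nodup keys, every entry IS the first match for its key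
theorem pvFind_of_nodup (d : List (String × Int)) (p : String × Int)
    (hnd : (d.map Prod.fst).Nodup) (hp : p ∈ d) :
    d.find? (fun q => q.1 == p.1) = some p := by
  induction d with
  | nil => exact absurd hp (by simp)
  | cons q qs ih =>
    rcases List.mem_cons.mp hp with rfl | hp'
    · simp
    · have hnd' := (List.nodup_cons.mp hnd)
      by_cases hq : q.1 = p.1
      · exfalso
        exact hnd'.1 (by rw [hq]; exact List.mem_map.mpr ⟨p, hp', rfl⟩)
      · have hbeq : (q.1 == p.1) = false := by simpa using hq
        simp only [List.find?_cons, hbeq]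
        exact ih hnd'.2 hp'

theorem pvAlt_length (s : String) (d : List (String × Int)) :
    (AUint2Labels_alt s d).length = d.length := by
  unfold AUint2Labels_alt
  simp

theorem pvAlt_getD (s : String) (d : List (String × Int)) (i : ℕ) (hi : i < d.length) :
    (AUint2Labels_alt s d).getD i 0 =
      if (i : Int) ∈ pvValid d (PySem.Set.ofList ((PySem.Str.split? s ", ").getD [])) then 1 else 0 := by
  unfold AUint2Labels_alt
  rw [List.getD_eq_getElem _ 0 (by simpa [pvAlt_length] using hi)]
  simp

-- B marks position i iff some (unique-keyed) entry bound to a split token targets exactly i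
theorem pvAlt_mem (s : String) (d : List (String × Int))
    (hnd : (d.map Prod.fst).Nodup) (x : Int) :
    x ∈ pvValid d (PySem.Set.ofList ((PySem.Str.split? s ", ").getD [])) ↔
      ∃ AU ∈ (PySem.Str.split? s ", ").getD [], pvLookup d AU = some x ∧ 0 ≤ x ∧ x < (d.length : Int) := by
  unfold pvValid
  rw [pvValid_fold_mem]
  constructor
  · rintro (h | ⟨p, hp, ht, rfl, hb⟩)
    · exact absurd h (by simp [PySem.Set.empty])
    · refine ⟨p.1, by simpa [PySem.Set.mem_ofList] using ht, ?_, hb⟩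
      exact pvLookup_of_find d p (pvFind_of_nodup d p hnd hp)
  · rintro ⟨AU, hAU, hlk, hb⟩
    obtain ⟨p, hpmem, hpAU, hpv, _⟩ := pvLookup_elim d AU x hlk
    exact Or.inr ⟨p, hpmem, by rw [hpAU]; simpa [PySem.Set.mem_ofList] using hAU, hpv, hb⟩

theorem pvA_foldEq (s : String) (d : List (String × Int)) :
    AUint2Labels s d =
      ((PySem.Str.split? s ", ").getD []).foldl (pvStepA d)
        (List.replicate d.length (0 : Int)) := rfl

-- ===== VERDICT (by name: the statement is the Claim_ definition above) =====
theorem AUint2Labels_spec : Claim_unchanged_AUint2Labels := by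
  intro s d _ hnd hnD
  show AUint2Labels s d = AUint2Labels_alt s d
  rw [pvA_foldEq]
  apply List.ext_getElem
  · rw [pvFoldA_length, pvAlt_length]; simp
  · intro i hi₁ hi₂
    have hiN : i < d.length := by
      rw [pvFoldA_length] at hi₁; simpa using hi₁
    rw [← List.getD_eq_getElem _ 0 hi₁, ← List.getD_eq_getElem _ 0 hi₂]
    rw [pvFoldA_get d _ _ i (by simpa using hiN)]
    rw [pvAlt_getD s d i hiN]
    have hrep : (List.replicate d.length (0 : Int)).getD i 0 = 0 := by simp
    rw [hrep]
    simp only [List.length_replicate]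
    have hiff : ((PySem.Str.split? s ", ").getD []).any
          (fun AU => pvHitB d d.length AU i) = true ↔
        (i : Int) ∈ pvValid d (PySem.Set.ofList ((PySem.Str.split? s ", ").getD [])) := by
      rw [pvAlt_mem s d hnd, List.any_eq_true]
      constructor
      · rintro ⟨AU, hAU, hhit⟩
        obtain ⟨v, hlk, hb1, hb2, hdisj⟩ := (pvHitB_iff d d.length AU i).mp hhit
        rcases hdisj with hiv | hiw
        · exact ⟨AU, hAU, by rw [hlk, hiv], by positivity, by exact_mod_cast hiN⟩
        · -- wrapped write: v < 0; ¬D_ supplies an aliasing non-negative binding for position i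
          have hvneg : v < 0 := by omega
          obtain ⟨p, hpmem, hpAU, hpv, hpfind⟩ := pvLookup_elim d AU v hlk
          by_contra hno
          apply hnD
          refine ⟨p, hpmem, by rw [hpAU]; exact hAU, by rw [hpAU]; exact hpfind,
            by omega, by omega, ?_⟩
          rintro ⟨kw, hkwmem, hkwtok, hkwfind, hkwval⟩
          apply hno
          refine ⟨kw.1, hkwtok, ?_, by omega, by exact_mod_cast hiN⟩
          rw [pvLookup_of_find d kw hkwfind]
          congr 1
          omega
      · rintro ⟨AU, hAU, hlk, hge, hlt⟩
        refine ⟨AU, hAU, (pvHitB_iff d d.length AU i).mpr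
          ⟨(i : Int), hlk, by omega, by exact_mod_cast hiN, Or.inl rfl⟩⟩
    by_cases hc : ((PySem.Str.split? s ", ").getD []).any
        (fun AU => pvHitB d d.length AU i) = true
    · rw [if_pos hc, if_pos (hiff.mp hc)]
    · rw [if_neg hc, if_neg (fun h => hc (hiff.mpr h))]

theorem AUint2Labels_changed : Claim_changed_AUint2Labels := by
  unfold Claim_changed_AUint2Labels; decide

theorem AUint2Labels_tight : Claim_exact_AUint2Labels := by
  intro s d _ hnd hD heq
  obtain ⟨kv, hmem, htok, hfind, hb1, hb2, hnal⟩ := hD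
  have hn1 : 1 ≤ d.length := List.length_pos_iff.mpr (by rintro rfl; simp at hmem)
  have hpn : (kv.2 + d.length).toNat < d.length := by omega
  have hA : (AUint2Labels s d).getD (kv.2 + d.length).toNat 0 = 1 := by
    rw [pvA_foldEq, pvFoldA_get d _ _ (kv.2 + d.length).toNat (by simpa using hpn)]
    rw [if_pos (List.any_eq_true.mpr ⟨kv.1, htok,
      (pvHitB_iff d _ kv.1 _).mpr ⟨kv.2, pvLookup_of_find d kv hfind,
        by simpa using hb1, by simp; omega, Or.inr (by simp; omega)⟩⟩)]
  have hB : (AUint2Labels_alt s d).getD (kv.2 + d.length).toNat 0 = 0 := by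
    rw [pvAlt_getD s d _ hpn, if_neg ?_]
    rw [pvAlt_mem s d hnd]
    rintro ⟨AU, hAU, hlk, hge, hlt⟩
    obtain ⟨q, hqmem, hqAU, hqv, hqfind⟩ := pvLookup_elim d AU _ hlk
    exact hnal ⟨q, hqmem, by rw [hqAU]; exact hAU, by rw [hqAU]; exact hqfind, by omega⟩
  rw [heq, hB] at hA
  exact absurd hA (by norm_num)
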